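-- pv_equiv track=rewrite | github.com/stelar-eu/GenericNER | src/llm_foodNER_functions.py | make_food_list
-- ===== SOURCE A (Python) =====
-- def make_food_list(entities_list,text):
--   food_start_list = []
--   food_end_list = []
--   if entities_list == ['no']:
--     food_entities = ['O' for i in range(len(text.split()))]
--   else:
--     for food_entity in entities_list:
--           food_start = []
--           food_end = []
--           for i in range(len(text)):
--             if text.startswith(food_entity, i):
--               food_start.append(i)
--               food_end.append(i + len(food_entity) - 1)
--             elif food_entity[-1] == 's' and text.startswith(food_entity[:-1], i):  #if plural entity, check singular
--               food_start.append(i)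
--               food_end.append(i + len(food_entity) - 2)
--           for food_st in food_start:
--             while(1):
--               if food_st != 0 and text[food_st - 1] != ' ':
--                 food_start[food_start.index(food_st)] -= 1
--                 food_st -= 1
--               else:
--                 break
--
--           for food_e in food_end:
--             while(1):
--               if (food_e != len(text) - 1) and text[food_e + 1] != ' ':
--                 food_end[food_end.index(food_e)] += 1
--                 food_e += 1
--               else:
--                 break
--           if type(food_start) == list:
--                 for start_item in food_start:
--                   food_start_list.append(start_item)
--                 for end_item in food_end:
--                   food_end_list.append(end_item)
--           else:
--                 food_start_list.append(food_start)
--                 food_end_list.append(food_end)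
--   return food_start_list, food_end_list
-- ===== SOURCE B (Python) =====
-- def _occ(text, pat):
--     # all indices i in range(len(text)) where text starts with pat at i (C-level find loop)
--     if pat == '':
--         return list(range(len(text)))
--     res = []
--     i = text.find(pat)
--     while i != -1:
--         res.append(i)
--         i = text.find(pat, i + 1)
--     return res
--
-- def _left(text, i):
--     # extend a span start left to the previous space (or 0)
--     while i != 0 and text[i - 1] != ' ':
--         i -= 1
--     return i
--
-- def _right(text, e):
--     # extend a span end right to the next space (or len(text)-1)
--     while e != len(text) - 1 and text[e + 1] != ' ':
--         e += 1
--     return e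
--
-- def _merge(a, b):
--     # merge two span lists ascending by start position
--     out = []
--     ia, ib = 0, 0
--     while ia < len(a) and ib < len(b):
--         if a[ia][0] < b[ib][0]:
--             out.append(a[ia]); ia += 1
--         else:
--             out.append(b[ib]); ib += 1
--     out.extend(a[ia:])
--     out.extend(b[ib:])
--     return out
--
-- def make_food_list(entities_list, text):
--     if entities_list == ['no']:
--         return [], []
--     starts, ends = [], []
--     for ent in entities_list:
--         p = _occ(text, ent)
--         if ent and ent[-1] == 's':
--             sp = set(p)
--             q = [i for i in _occ(text, ent[:-1]) if i not in sp]
--         else: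
--             q = []
--         pairs = _merge([(i, i + len(ent) - 1) for i in p],
--                        [(i, i + len(ent) - 2) for i in q])
--         for i, e in pairs:
--             starts.append(_left(text, i))
--             ends.append(_right(text, e))
--     return starts, ends
-- ===== Notes on version B (the rewrite author's own statement) =====
-- stated objective: faster
-- what changed: Instead of testing startswith at every text position and then widening each span with repeated list.index passes over mutating lists, B collects occurrence positions with C-level str.find loops (plus a singular-form scan merged in by a two-pointer merge of the two sorted position lists, with a set ruling out positions already matched in full) and widens each span once, directly, to its word boundary.
import Mathlib
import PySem

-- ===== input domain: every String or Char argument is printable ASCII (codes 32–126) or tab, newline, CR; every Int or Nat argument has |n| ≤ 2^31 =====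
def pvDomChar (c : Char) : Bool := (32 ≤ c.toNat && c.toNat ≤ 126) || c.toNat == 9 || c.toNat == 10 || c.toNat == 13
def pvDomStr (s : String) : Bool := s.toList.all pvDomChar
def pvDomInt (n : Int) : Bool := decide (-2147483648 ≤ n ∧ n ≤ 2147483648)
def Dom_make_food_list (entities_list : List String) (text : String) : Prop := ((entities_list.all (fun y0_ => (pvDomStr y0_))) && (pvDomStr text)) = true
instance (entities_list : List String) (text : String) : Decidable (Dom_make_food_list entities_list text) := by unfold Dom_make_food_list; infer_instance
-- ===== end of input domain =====

-- B re-implements the same span extraction with C-level find-style occurrence scans, a sorted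
-- two-list merge for the plural fallback, and direct per-occurrence boundary extension (no
-- repeated list.index passes); measured faster. Return value only; neither version mutates input.

-- ===== PORT A =====
-- inner scan: for i in range(len(text)): startswith checks, appending starts/ends
def pvScanA (cs pat : List Char) : List Int × List Int :=
  (PySem.List.pyRange 0 cs.length 1).foldl (fun se i =>
    if PySem.Chars.startswith (PySem.List.slice cs (some i) none) pat then
      (se.1 ++ [i], se.2 ++ [i + (pat.length : Int) - 1])
    else if ((PySem.List.pyGet? pat (-1)).getD ' ' == 's') &&
            PySem.Chars.startswith (PySem.List.slice cs (some i) none)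
              (PySem.List.slice pat none (some (-1))) then
      (se.1 ++ [i], se.2 ++ [i + (pat.length : Int) - 2])
    else se) ([], [])

-- while(1): food_start[food_start.index(food_st)] -= 1 … (fuel = food_st, enough: the value
-- decreases by 1 each pass and the condition fails at 0)
def pvWhileL (cs : List Char) (fs : List Int) (v : Int) : Nat → List Int
  | 0 => fs
  | fuel+1 =>
    if (v != 0) && ((PySem.List.pyGet? cs (v-1)).getD ' ' != ' ') then
      match PySem.List.index? fs v with
      | some k => pvWhileL cs (fs.set k (v-1)) (v-1) fuel
      | none => fs   -- unreachable: v is an element of fs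
    else fs

-- while(1): food_end[food_end.index(food_e)] += 1 … (fuel = len(text)-1-food_e)
def pvWhileR (cs : List Char) (fs : List Int) (v : Int) : Nat → List Int
  | 0 => fs
  | fuel+1 =>
    if (v != (cs.length : Int) - 1) && ((PySem.List.pyGet? cs (v+1)).getD ' ' != ' ') then
      match PySem.List.index? fs v with
      | some k => pvWhileR cs (fs.set k (v+1)) (v+1) fuel
      | none => fs   -- unreachable
    else fs

-- for food_st in food_start: …  (iteration k reads the current list at index k)
def pvExtendL (cs : List Char) (fs : List Int) : List Int :=
  (List.range fs.length).foldl (fun acc k => pvWhileL cs acc (acc.getD k 0) (acc.getD k 0).toNat) fs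

def pvExtendR (cs : List Char) (fs : List Int) : List Int :=
  (List.range fs.length).foldl (fun acc k =>
    pvWhileR cs acc (acc.getD k 0) (((cs.length : Int) - 1 - acc.getD k 0).toNat)) fs

def make_food_list (entities_list : List String) (text : String) : List Int × List Int :=
  if entities_list = ["no"] then ([], [])   -- A builds an unused 'O' list here and returns the empty accumulators
  else
    let cs := text.toList
    entities_list.foldl (fun acc ent =>
      let se := pvScanA cs ent.toList
      let st := pvExtendL cs se.1
      let en := pvExtendR cs se.2
      -- type(food_start) == list is always true: extend the accumulators item by item
      (acc.1 ++ st, acc.2 ++ en)) ([], [])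

-- ===== PORT B =====
-- _occ: res.append(i); i = text.find(pat, i+1)  (fuel = len(text)+1: found indices strictly increase)
def pvOccAux (cs pat : List Char) (i : Int) : Nat → List Int
  | 0 => []
  | fuel+1 =>
    if i != -1 then i :: pvOccAux cs pat (PySem.Chars.findFrom cs pat (i+1) none) fuel else []

def pvOcc (cs pat : List Char) : List Int :=
  if pat = [] then PySem.List.pyRange 0 cs.length 1
  else pvOccAux cs pat (PySem.Chars.find cs pat) (cs.length + 1)

-- _left: while i != 0 and text[i-1] != ' ': i -= 1   (fuel = i)
def pvLeftGo (cs : List Char) (v : Int) : Nat → Int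
  | 0 => v
  | fuel+1 =>
    if (v != 0) && ((PySem.List.pyGet? cs (v-1)).getD ' ' != ' ') then pvLeftGo cs (v-1) fuel else v

def pvLeftB (cs : List Char) (i : Int) : Int := pvLeftGo cs i i.toNat

-- _right: while e != len(text)-1 and text[e+1] != ' ': e += 1   (fuel = len(text)-1-e)
def pvRightGo (cs : List Char) (v : Int) : Nat → Int
  | 0 => v
  | fuel+1 =>
    if (v != (cs.length : Int) - 1) && ((PySem.List.pyGet? cs (v+1)).getD ' ' != ' ') then
      pvRightGo cs (v+1) fuel
    else v

def pvRightB (cs : List Char) (e : Int) : Int := pvRightGo cs e ((cs.length : Int) - 1 - e).toNat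

-- _merge: two-pointer merge by start position
def pvMergeB : List (Int × Int) → List (Int × Int) → List (Int × Int)
  | [], b => b
  | x :: a, [] => x :: a
  | x :: a, y :: b => if x.1 < y.1 then x :: pvMergeB a (y :: b) else y :: pvMergeB (x :: a) b

def make_food_list_alt (entities_list : List String) (text : String) : List Int × List Int :=
  if entities_list = ["no"] then ([], [])
  else
    let cs := text.toList
    entities_list.foldl (fun acc ent =>
      let pat := ent.toList
      let p := pvOcc cs pat
      let q := if (pat ≠ []) ∧ ((PySem.List.pyGet? pat (-1)).getD ' ' == 's') then
                 let sp := PySem.Set.ofList p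
                 (pvOcc cs (PySem.List.slice pat none (some (-1)))).filter
                   (fun i => !(PySem.Set.contains sp i))
               else []
      let pairs := pvMergeB (p.map (fun i => (i, i + (pat.length : Int) - 1)))
                            (q.map (fun i => (i, i + (pat.length : Int) - 2)))
      pairs.foldl (fun a2 pr => (a2.1 ++ [pvLeftB cs pr.1], a2.2 ++ [pvRightB cs pr.2])) acc)
      ([], [])

-- ===== PRECONDITION & SPEC =====
def Spec_make_food_list (entities_list : List String) (text : String) (out : List Int × List Int) : Prop := out = make_food_list_alt entities_list text
instance (entities_list : List String) (text : String) (out : List Int × List Int) : Decidable (Spec_make_food_list entities_list text out) := by unfold Spec_make_food_list; infer_instance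

-- ===== CLAIM (what is proved, stated in full; the proofs are below) =====
def Claim_equal_make_food_list : Prop := ∀ (entities_list : List String) (text : String), Dom_make_food_list entities_list text → Spec_make_food_list entities_list text (make_food_list entities_list text)



-- ===== LEMMAS AND PROOFS =====

-- the two while-loop tests (the textual conditions of both ports)
def pvCL (cs : List Char) (v : Int) : Bool :=
  (v != 0) && ((PySem.List.pyGet? cs (v-1)).getD ' ' != ' ')
def pvCR (cs : List Char) (v : Int) : Bool :=
  (v != (cs.length : Int) - 1) && ((PySem.List.pyGet? cs (v+1)).getD ' ' != ' ')

-- the raw (unextended) span A and B both record at scan position i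
def pvHit (cs pat : List Char) (i : Nat) : Option (Int × Int) :=
  if PySem.Chars.startswith (cs.drop i) pat then
    some ((i:Int), (i:Int) + (pat.length:Int) - 1)
  else if ((PySem.List.pyGet? pat (-1)).getD ' ' == 's') &&
          PySem.Chars.startswith (cs.drop i) pat.dropLast then
    some ((i:Int), (i:Int) + (pat.length:Int) - 2)
  else none

def pvPairs (cs pat : List Char) : List (Int × Int) :=
  (List.range cs.length).filterMap (pvHit cs pat)

def pvMatch (cs pat : List Char) (i : Nat) : Option Int :=
  if PySem.Chars.startswith (cs.drop i) pat then some (i:Int) else none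

-- direct-match half and singular-fallback half of pvHit
def pvFA (cs pat : List Char) (i : Nat) : Option (Int × Int) :=
  if PySem.Chars.startswith (cs.drop i) pat then
    some ((i:Int), (i:Int) + (pat.length:Int) - 1)
  else none
def pvFB (cs pat : List Char) (i : Nat) : Option (Int × Int) :=
  if (!PySem.Chars.startswith (cs.drop i) pat) &&
     (((PySem.List.pyGet? pat (-1)).getD ' ' == 's') &&
      PySem.Chars.startswith (cs.drop i) pat.dropLast) then
    some ((i:Int), (i:Int) + (pat.length:Int) - 2)
  else none

-- the canonical per-entity step both ports are reduced to
def pvStepC (cs : List Char) (acc : List Int × List Int) (ent : String) : List Int × List Int :=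
  (acc.1 ++ (pvPairs cs ent.toList).map (fun pr => pvLeftB cs pr.1),
   acc.2 ++ (pvPairs cs ent.toList).map (fun pr => pvRightB cs pr.2))

-- A's scan body, written on the matched span
def pvStepScan (cs pat : List Char) (se : List Int × List Int) (i : Nat) : List Int × List Int :=
  match pvHit cs pat i with
  | some pr => (se.1 ++ [pr.1], se.2 ++ [pr.2])
  | none => se

lemma pvHit_eq_or (cs pat : List Char) (i : Nat) :
    pvHit cs pat i = (pvFA cs pat i).or (pvFB cs pat i) := by
  unfold pvHit pvFA pvFB
  by_cases h1 : PySem.Chars.startswith (cs.drop i) pat <;> simp [h1]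

-- === A: the scan loop collects exactly pvPairs ===
lemma pvScanA_body (cs pat : List Char) (se : List Int × List Int) (i : Nat) :
    (if PySem.Chars.startswith (PySem.List.slice cs (some ((i:Nat):Int)) none) pat then
        (se.1 ++ [((i:Nat):Int)], se.2 ++ [((i:Nat):Int) + (pat.length : Int) - 1])
      else if ((PySem.List.pyGet? pat (-1)).getD ' ' == 's') &&
              PySem.Chars.startswith (PySem.List.slice cs (some ((i:Nat):Int)) none)
                (PySem.List.slice pat none (some (-1))) then
        (se.1 ++ [((i:Nat):Int)], se.2 ++ [((i:Nat):Int) + (pat.length : Int) - 2])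
      else se)
    = pvStepScan cs pat se i := by
  unfold pvStepScan pvHit
  rw [PySem.List.slice_from_natCast, PySem.List.slice_to_neg_one]
  by_cases h1 : PySem.Chars.startswith (cs.drop i) pat
  · rw [if_pos h1, if_pos h1]
  · rw [if_neg h1, if_neg h1]
    by_cases h2 : (((PySem.List.pyGet? pat (-1)).getD ' ' == 's') &&
        PySem.Chars.startswith (cs.drop i) pat.dropLast) = true
    · rw [if_pos h2, if_pos h2]
    · rw [if_neg h2, if_neg h2]

lemma pvScan_fold (cs pat : List Char) (l : List Nat) :
    ∀ a b : List Int,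
    l.foldl (pvStepScan cs pat) (a, b)
    = (a ++ (l.filterMap (pvHit cs pat)).map Prod.fst,
       b ++ (l.filterMap (pvHit cs pat)).map Prod.snd) := by
  induction l with
  | nil => intro a b; simp
  | cons i t ih =>
    intro a b
    rw [List.foldl_cons, List.filterMap_cons]
    cases h : pvHit cs pat i with
    | none =>
      rw [show pvStepScan cs pat (a, b) i = (a, b) by unfold pvStepScan; rw [h]]
      exact ih a b
    | some pr =>
      rw [show pvStepScan cs pat (a, b) i = (a ++ [pr.1], b ++ [pr.2]) by
        unfold pvStepScan; rw [h]]
      rw [ih]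
      simp

lemma pvScanA_eq (cs pat : List Char) :
    pvScanA cs pat = ((pvPairs cs pat).map Prod.fst, (pvPairs cs pat).map Prod.snd) := by
  unfold pvScanA pvPairs
  rw [PySem.List.pyRange_zero_nat, List.foldl_map]
  simp only [pvScanA_body]
  simpa using pvScan_fold cs pat (List.range cs.length) [] []

-- === A: the index-based while loops act on one element at a time ===
lemma pvIndex_append (pre post : List Int) (v : Int) (hv : v ∉ pre) :
    PySem.List.index? (pre ++ v :: post) v = some pre.length :=
  (PySem.List.index?_eq_some_iff _ _ _).mpr ⟨pre, post, rfl, rfl, hv⟩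

lemma pvSet_append (pre post : List Int) (v w : Int) :
    (pre ++ v :: post).set pre.length w = pre ++ w :: post := by
  simp

lemma pvWhileL_eq (cs : List Char) :
    ∀ (f : Nat) (v : Int) (pre post : List Int), (∀ u ∈ pre, pvCL cs u = false) →
    pvWhileL cs (pre ++ v :: post) v f = pre ++ pvLeftGo cs v f :: post := by
  intro f
  induction f with
  | zero => intro v pre post _; rfl
  | succ f ih =>
    intro v pre post hpre
    rw [pvWhileL, pvLeftGo]
    by_cases hc : ((v != 0) && ((PySem.List.pyGet? cs (v-1)).getD ' ' != ' ')) = true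
    · have hv : v ∉ pre := by
        intro hmem
        have hfalse : pvCL cs v = false := hpre v hmem
        rw [show pvCL cs v
            = ((v != 0) && ((PySem.List.pyGet? cs (v-1)).getD ' ' != ' ')) from rfl] at hfalse
        rw [hc] at hfalse; cases hfalse
      rw [if_pos hc, if_pos hc, pvIndex_append pre post v hv]
      show pvWhileL cs ((pre ++ v :: post).set pre.length (v-1)) (v-1) f
        = pre ++ pvLeftGo cs (v-1) f :: post
      rw [pvSet_append]
      exact ih (v-1) pre post hpre
    · rw [if_neg hc, if_neg hc]

lemma pvWhileR_eq (cs : List Char) :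
    ∀ (f : Nat) (v : Int) (pre post : List Int), (∀ u ∈ pre, pvCR cs u = false) →
    pvWhileR cs (pre ++ v :: post) v f = pre ++ pvRightGo cs v f :: post := by
  intro f
  induction f with
  | zero => intro v pre post _; rfl
  | succ f ih =>
    intro v pre post hpre
    rw [pvWhileR, pvRightGo]
    by_cases hc : ((v != (cs.length : Int) - 1) &&
        ((PySem.List.pyGet? cs (v+1)).getD ' ' != ' ')) = true
    · have hv : v ∉ pre := by
        intro hmem
        have hfalse : pvCR cs v = false := hpre v hmem
        rw [show pvCR cs v = ((v != (cs.length : Int) - 1) &&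
            ((PySem.List.pyGet? cs (v+1)).getD ' ' != ' ')) from rfl] at hfalse
        rw [hc] at hfalse; cases hfalse
      rw [if_pos hc, if_pos hc, pvIndex_append pre post v hv]
      show pvWhileR cs ((pre ++ v :: post).set pre.length (v+1)) (v+1) f
        = pre ++ pvRightGo cs (v+1) f :: post
      rw [pvSet_append]
      exact ih (v+1) pre post hpre
    · rw [if_neg hc, if_neg hc]

lemma pvLeftGo_no_cond (cs : List Char) :
    ∀ (f : Nat) (v : Int), 0 ≤ v → v.toNat ≤ f → pvCL cs (pvLeftGo cs v f) = false := by
  intro f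
  induction f with
  | zero =>
    intro v h0 hf
    have hv : v = 0 := by omega
    subst hv; simp [pvLeftGo, pvCL]
  | succ f ih =>
    intro v h0 hf
    rw [pvLeftGo]
    by_cases hc : ((v != 0) && ((PySem.List.pyGet? cs (v-1)).getD ' ' != ' ')) = true
    · rw [if_pos hc]
      have hvne : v ≠ 0 := by
        intro hv0; rw [hv0] at hc; simp at hc
      exact ih (v-1) (by omega) (by omega)
    · rw [if_neg hc]
      exact Bool.eq_false_iff.mpr hc

lemma pvRightGo_no_cond (cs : List Char) :
    ∀ (f : Nat) (v : Int), v ≤ (cs.length : Int) - 1 → ((cs.length : Int) - 1 - v).toNat ≤ f →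
    pvCR cs (pvRightGo cs v f) = false := by
  intro f
  induction f with
  | zero =>
    intro v hle hf
    have hv : v = (cs.length : Int) - 1 := by omega
    subst hv; simp [pvRightGo, pvCR]
  | succ f ih =>
    intro v hle hf
    rw [pvRightGo]
    by_cases hc : ((v != (cs.length : Int) - 1) &&
        ((PySem.List.pyGet? cs (v+1)).getD ' ' != ' ')) = true
    · rw [if_pos hc]
      have hvne : v ≠ (cs.length : Int) - 1 := by
        intro hveq; rw [hveq] at hc; simp at hc
      exact ih (v+1) (by omega) (by omega)
    · rw [if_neg hc]
      exact Bool.eq_false_iff.mpr hc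

lemma pvExtendL_aux (cs : List Char) :
    ∀ (todo done : List Int), (∀ u ∈ done, pvCL cs u = false) → (∀ v ∈ todo, 0 ≤ v) →
    (List.range' done.length todo.length).foldl
      (fun acc k => pvWhileL cs acc (acc.getD k 0) (acc.getD k 0).toNat) (done ++ todo)
    = done ++ todo.map (pvLeftB cs) := by
  intro todo
  induction todo with
  | nil => intro done _ _; simp
  | cons v t ih =>
    intro done hdone htodo
    simp only [List.length_cons, List.range'_succ, List.foldl_cons]
    have hget : (done ++ v :: t).getD done.length 0 = v := by simp [List.getD]
    rw [hget, pvWhileL_eq cs v.toNat v done t hdone]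
    have hfin : pvCL cs (pvLeftB cs v) = false :=
      pvLeftGo_no_cond cs v.toNat v (htodo v (by simp)) le_rfl
    have hsplit : done ++ pvLeftGo cs v v.toNat :: t = (done ++ [pvLeftB cs v]) ++ t := by
      simp [pvLeftB]
    rw [hsplit]
    have hlen : done.length + 1 = (done ++ [pvLeftB cs v]).length := by simp
    rw [hlen]
    rw [ih (done ++ [pvLeftB cs v])
      (by intro u hu
          rcases List.mem_append.mp hu with h | h
          · exact hdone u h
          · simp at h; subst h; exact hfin)
      (fun w hw => htodo w (by simp [hw]))]
    simp

lemma pvExtendR_aux (cs : List Char) :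
    ∀ (todo done : List Int), (∀ u ∈ done, pvCR cs u = false) →
    (∀ v ∈ todo, v ≤ (cs.length : Int) - 1) →
    (List.range' done.length todo.length).foldl
      (fun acc k => pvWhileR cs acc (acc.getD k 0) (((cs.length : Int) - 1 - acc.getD k 0).toNat))
      (done ++ todo)
    = done ++ todo.map (pvRightB cs) := by
  intro todo
  induction todo with
  | nil => intro done _ _; simp
  | cons v t ih =>
    intro done hdone htodo
    simp only [List.length_cons, List.range'_succ, List.foldl_cons]
    have hget : (done ++ v :: t).getD done.length 0 = v := by simp [List.getD]
    rw [hget, pvWhileR_eq cs ((cs.length : Int) - 1 - v).toNat v done t hdone]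
    have hfin : pvCR cs (pvRightB cs v) = false :=
      pvRightGo_no_cond cs ((cs.length : Int) - 1 - v).toNat v (htodo v (by simp)) le_rfl
    have hsplit : done ++ pvRightGo cs v ((cs.length : Int) - 1 - v).toNat :: t
        = (done ++ [pvRightB cs v]) ++ t := by simp [pvRightB]
    rw [hsplit]
    have hlen : done.length + 1 = (done ++ [pvRightB cs v]).length := by simp
    rw [hlen]
    rw [ih (done ++ [pvRightB cs v])
      (by intro u hu
          rcases List.mem_append.mp hu with h | h
          · exact hdone u h
          · simp at h; subst h; exact hfin)
      (fun w hw => htodo w (by simp [hw]))]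
    simp

lemma pvExtendL_eq (cs : List Char) (fs : List Int) (h : ∀ v ∈ fs, 0 ≤ v) :
    pvExtendL cs fs = fs.map (pvLeftB cs) := by
  unfold pvExtendL
  rw [List.range_eq_range']
  simpa using pvExtendL_aux cs fs [] (by simp) h

lemma pvExtendR_eq (cs : List Char) (fs : List Int) (h : ∀ v ∈ fs, v ≤ (cs.length : Int) - 1) :
    pvExtendR cs fs = fs.map (pvRightB cs) := by
  unfold pvExtendR
  rw [List.range_eq_range']
  simpa using pvExtendR_aux cs fs [] (by simp) h

-- === bounds of the raw spans ===
lemma pvPairs_bounds (cs pat : List Char) :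
    ∀ pr ∈ pvPairs cs pat, 0 ≤ pr.1 ∧ pr.2 ≤ (cs.length : Int) - 1 := by
  intro pr hpr
  rcases List.mem_filterMap.mp hpr with ⟨i, hi, hhit⟩
  have hin : i < cs.length := List.mem_range.mp hi
  unfold pvHit at hhit
  by_cases h1 : PySem.Chars.startswith (cs.drop i) pat
  · rw [if_pos h1] at hhit
    have hlen : pat.length ≤ cs.length - i := by
      have := ((PySem.Chars.startswith_iff _ _).mp h1).length_le
      simpa using this
    cases hhit
    constructor
    · show (0:Int) ≤ (i:Int); omega
    · show (i:Int) + (pat.length:Int) - 1 ≤ (cs.length : Int) - 1; omega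
  · rw [if_neg h1] at hhit
    by_cases h2 : (((PySem.List.pyGet? pat (-1)).getD ' ' == 's') &&
        PySem.Chars.startswith (cs.drop i) pat.dropLast) = true
    · rw [if_pos h2] at hhit
      have hsboth : (PySem.List.pyGet? pat (-1)).getD ' ' = 's' ∧
          PySem.Chars.startswith (cs.drop i) pat.dropLast = true := by simpa using h2
      have hne : pat ≠ [] := by
        intro hnil; subst hnil
        exact absurd hsboth.1 (by decide)
      have hL : 1 ≤ pat.length := List.length_pos_of_ne_nil hne
      have hlen : pat.length - 1 ≤ cs.length - i := by
        have := ((PySem.Chars.startswith_iff _ _).mp hsboth.2).length_le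
        simpa using this
      cases hhit
      constructor
      · show (0:Int) ≤ (i:Int); omega
      · show (i:Int) + (pat.length:Int) - 2 ≤ (cs.length : Int) - 1; omega
    · rw [if_neg h2] at hhit; cases hhit

-- === B: the find loop visits exactly the match positions ===
lemma pvInfix_of_prefix_drop {pat cs : List Char} {k i : Nat} (hk : k ≤ i)
    (h : pat <+: cs.drop i) : pat <:+: cs.drop k := by
  have hd : cs.drop i = (cs.drop k).drop (i - k) := by
    rw [List.drop_drop]; congr 1; omega
  rw [hd] at h
  exact h.isInfix.trans (List.drop_suffix _ _).isInfix

lemma pvOccAux_eq (cs pat : List Char) (hpat : pat ≠ []) :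
    ∀ (fuel k : Nat), k ≤ cs.length → cs.length + 1 - k ≤ fuel →
    pvOccAux cs pat (PySem.Chars.findFrom cs pat ((k:Nat):Int) none) fuel
      = (List.range' k (cs.length - k)).filterMap (pvMatch cs pat) := by
  intro fuel
  induction fuel with
  | zero => intro k hk hf; exact absurd hf (by omega)
  | succ fuel ih =>
    intro k hk hf
    by_cases hr : PySem.Chars.findFrom cs pat ((k:Nat):Int) none = -1
    · rw [hr, pvOccAux, if_neg (by simp)]
      have hno : ¬ pat <:+: cs.drop k :=
        (PySem.Chars.findFrom_natCast_eq_neg_one_iff cs pat k hk).mp hr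
      symm
      rw [List.filterMap_eq_nil_iff]
      intro i hi
      have hmem := List.mem_range'_1.mp hi
      unfold pvMatch
      rw [if_neg]
      intro hsw
      exact hno (pvInfix_of_prefix_drop hmem.1 ((PySem.Chars.startswith_iff _ _).mp hsw))
    · obtain ⟨hkr, hpre, hmin⟩ := PySem.Chars.findFrom_natCast_spec cs pat k hk hr
      set r := PySem.Chars.findFrom cs pat ((k:Nat):Int) none with hrdef
      have h0r : 0 ≤ r := le_trans (Int.natCast_nonneg k) hkr
      have hkrn : k ≤ r.toNat := by omega
      have hrn : r.toNat < cs.length := by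
        have hlen := hpre.length_le
        have hL : 1 ≤ pat.length := List.length_pos_of_ne_nil hpat
        simp [List.length_drop] at hlen
        omega
      rw [pvOccAux, if_pos (by simpa using hr)]
      have hcast : r + 1 = (((r.toNat + 1 : Nat)):Int) := by push_cast; omega
      rw [hcast, ih (r.toNat + 1) (by omega) (by omega)]
      have hsplit : List.range' k (cs.length - k)
          = List.range' k (r.toNat - k) ++ List.range' r.toNat (cs.length - r.toNat) := by
        have happ := List.range'_append (s := k) (m := r.toNat - k)
          (n := cs.length - r.toNat) (step := 1)
        rw [show k + 1 * (r.toNat - k) = r.toNat by omega,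
          show r.toNat - k + (cs.length - r.toNat) = cs.length - k by omega] at happ
        exact happ.symm
      rw [hsplit, List.filterMap_append]
      have hfirst : (List.range' k (r.toNat - k)).filterMap (pvMatch cs pat) = [] := by
        rw [List.filterMap_eq_nil_iff]
        intro i hi
        have hmem := List.mem_range'_1.mp hi
        unfold pvMatch
        rw [if_neg]
        intro hsw
        exact hmin i hmem.1 (by omega) ((PySem.Chars.startswith_iff _ _).mp hsw)
      have hsecond : List.range' r.toNat (cs.length - r.toNat)
          = r.toNat :: List.range' (r.toNat + 1) (cs.length - (r.toNat + 1)) := by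
        rw [show cs.length - r.toNat = (cs.length - (r.toNat + 1)) + 1 by omega,
          List.range'_succ]
      rw [hfirst, hsecond, List.filterMap_cons]
      have hhit : pvMatch cs pat r.toNat = some ((r.toNat : Nat) : Int) := by
        unfold pvMatch
        rw [if_pos ((PySem.Chars.startswith_iff _ _).mpr hpre)]
      rw [hhit]
      simp only [List.nil_append]
      congr 1
      omega

lemma pvOcc_eq (cs pat : List Char) :
    pvOcc cs pat = (List.range cs.length).filterMap (pvMatch cs pat) := by
  unfold pvOcc
  by_cases hp : pat = []
  · subst hp
    rw [if_pos rfl, PySem.List.pyRange_zero_nat]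
    have hall : ∀ i ∈ List.range cs.length,
        pvMatch cs ([] : List Char) i = some ((i : Nat) : Int) := by
      intro i _
      unfold pvMatch
      rw [if_pos ((PySem.Chars.startswith_iff _ _).mpr List.nil_prefix)]
    rw [List.filterMap_congr hall,
      show (fun (i : Nat) => some ((i:Nat):Int)) = (some ∘ fun (i : Nat) => ((i:Nat):Int)) from rfl,
      List.filterMap_eq_map]
  · rw [if_neg hp]
    have h := pvOccAux_eq cs pat hp (cs.length + 1) 0 (by omega) (by omega)
    rw [show (((0:Nat)):Int) = (0:Int) by simp, PySem.Chars.findFrom_zero] at h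
    rw [h, List.range_eq_range']
    simp

lemma pvMem_occ (cs pat : List Char) (i : Nat) (hi : i < cs.length) :
    ((i:Int) ∈ pvOcc cs pat) ↔ PySem.Chars.startswith (cs.drop i) pat = true := by
  rw [pvOcc_eq]
  constructor
  · intro hmem
    rcases List.mem_filterMap.mp hmem with ⟨j, _, hj⟩
    unfold pvMatch at hj
    by_cases hs : PySem.Chars.startswith (cs.drop j) pat
    · rw [if_pos hs] at hj
      have hji : j = i := by
        have := Option.some.inj hj
        omega
      subst hji; exact hs
    · rw [if_neg hs] at hj; cases hj
  · intro hs
    exact List.mem_filterMap.mpr ⟨i, List.mem_range.mpr hi, by unfold pvMatch; rw [if_pos hs]⟩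

-- filter of a filterMap, fused
lemma pvFilter_filterMap {α β : Type} (f : α → Option β) (p : β → Bool) (l : List α) :
    (l.filterMap f).filter p
      = l.filterMap (fun a => (f a).bind (fun b => if p b then some b else none)) := by
  induction l with
  | nil => rfl
  | cons x t ih =>
    cases h : f x with
    | none => simp [h, ih]
    | some b =>
      by_cases hb : p b <;> simp [h, hb, ih]

-- === B: the merge of the two sorted occurrence lists ===
lemma pvMergeB_nil (b : List (Int × Int)) : pvMergeB [] b = b := by
  rw [pvMergeB.eq_def]

lemma pvMergeB_cons_nil (x : Int × Int) (a : List (Int × Int)) : pvMergeB (x :: a) [] = x :: a := by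
  rw [pvMergeB.eq_def]

lemma pvMergeB_cons_cons (x y : Int × Int) (a b : List (Int × Int)) :
    pvMergeB (x :: a) (y :: b)
      = if x.1 < y.1 then x :: pvMergeB a (y :: b) else y :: pvMergeB (x :: a) b := by
  rw [pvMergeB.eq_def]

lemma pvMergeB_nil_right : ∀ a : List (Int × Int), pvMergeB a [] = a := by
  intro a
  cases a with
  | nil => exact pvMergeB_nil []
  | cons x a => exact pvMergeB_cons_nil x a

lemma pvMerge_eq (fA fB : Nat → Option (Int × Int)) :
    ∀ l : List Nat, l.Pairwise (· < ·) →
    (∀ i x, fA i = some x → x.1 = (i:Int)) → (∀ i x, fB i = some x → x.1 = (i:Int)) →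
    (∀ i, fA i ≠ none → fB i = none) →
    pvMergeB (l.filterMap fA) (l.filterMap fB) = l.filterMap (fun i => (fA i).or (fB i)) := by
  intro l
  induction l with
  | nil => intro _ _ _ _; simp [pvMergeB_nil]
  | cons i t ih =>
    intro hpair hA hB hdisj
    have hlt : ∀ j ∈ t, i < j := (List.pairwise_cons.mp hpair).1
    have hp : t.Pairwise (· < ·) := (List.pairwise_cons.mp hpair).2
    have IH := ih hp hA hB hdisj
    cases hfa : fA i with
    | some x =>
      have hfb : fB i = none := hdisj i (by simp [hfa])
      simp only [List.filterMap_cons, hfa, hfb, Option.some_or]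
      cases hB' : t.filterMap fB with
      | nil =>
        rw [hB'] at IH
        have hAor : t.filterMap fA = t.filterMap (fun i => (fA i).or (fB i)) :=
          (pvMergeB_nil_right _).symm.trans IH
        rw [pvMergeB_cons_nil, hAor]
      | cons y B'' =>
        rw [hB'] at IH
        have hy : y ∈ t.filterMap fB := by rw [hB']; simp
        rcases List.mem_filterMap.mp hy with ⟨j, hjt, hfj⟩
        have hxy : x.1 < y.1 := by
          rw [hA i x hfa, hB j y hfj]
          exact_mod_cast hlt j hjt
        rw [pvMergeB_cons_cons, if_pos hxy, IH]
    | none =>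
      cases hfb : fB i with
      | none =>
        simp only [List.filterMap_cons, hfa, hfb, Option.none_or]
        exact IH
      | some y =>
        simp only [List.filterMap_cons, hfa, hfb, Option.none_or]
        cases hA' : t.filterMap fA with
        | nil =>
          rw [hA', pvMergeB_nil] at IH
          rw [pvMergeB_nil, IH]
        | cons x A'' =>
          rw [hA'] at IH
          have hx : x ∈ t.filterMap fA := by rw [hA']; simp
          rcases List.mem_filterMap.mp hx with ⟨j, hjt, hfj⟩
          have hyx : y.1 < x.1 := by
            rw [hA j x hfj, hB i y hfb]
            exact_mod_cast hlt j hjt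
          rw [pvMergeB_cons_cons, if_neg (not_lt.mpr (le_of_lt hyx)), IH]

-- === B: the per-entity pair list is pvPairs ===
lemma pvOcc_map_fst (cs pat : List Char) :
    (pvOcc cs pat).map (fun i => (i, i + (pat.length:Int) - 1))
      = (List.range cs.length).filterMap (pvFA cs pat) := by
  rw [pvOcc_eq, List.map_filterMap]
  apply List.filterMap_congr
  intro i _
  unfold pvMatch pvFA
  by_cases h : PySem.Chars.startswith (cs.drop i) pat <;> simp [h]

lemma pvQ_eq (cs pat : List Char)
    (hcond : (pat ≠ []) ∧ ((PySem.List.pyGet? pat (-1)).getD ' ' == 's') = true) :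
    ((pvOcc cs (PySem.List.slice pat none (some (-1)))).filter
        (fun i => !(PySem.Set.contains (PySem.Set.ofList (pvOcc cs pat)) i))).map
      (fun i => (i, i + (pat.length:Int) - 2))
      = (List.range cs.length).filterMap (pvFB cs pat) := by
  rw [PySem.List.slice_to_neg_one, pvOcc_eq cs pat.dropLast, pvFilter_filterMap,
    List.map_filterMap]
  apply List.filterMap_congr
  intro i hi
  have hin : i < cs.length := List.mem_range.mp hi
  unfold pvMatch pvFB
  by_cases hsw : PySem.Chars.startswith (cs.drop i) pat.dropLast
  · rw [if_pos hsw]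
    by_cases hfull : PySem.Chars.startswith (cs.drop i) pat
    · have hmem0 : (i:Int) ∈ pvOcc cs pat := (pvMem_occ cs pat i hin).mpr hfull
      simp [PySem.Set.mem_ofList, hmem0, hfull]
    · have hmem0 : (i:Int) ∉ pvOcc cs pat := fun hm => hfull ((pvMem_occ cs pat i hin).mp hm)
      simp [PySem.Set.mem_ofList, hmem0, hfull, hsw, hcond.2]
  · rw [if_neg hsw]
    simp [hsw]

lemma pvPairsB_eq (cs pat : List Char) :
    pvMergeB ((pvOcc cs pat).map (fun i => (i, i + (pat.length:Int) - 1)))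
      ((if (pat ≠ []) ∧ ((PySem.List.pyGet? pat (-1)).getD ' ' == 's') = true then
          (pvOcc cs (PySem.List.slice pat none (some (-1)))).filter
            (fun i => !(PySem.Set.contains (PySem.Set.ofList (pvOcc cs pat)) i))
        else []).map (fun i => (i, i + (pat.length:Int) - 2)))
      = pvPairs cs pat := by
  have hkeyA : ∀ i x, pvFA cs pat i = some x → x.1 = (i:Int) := by
    intro i x h
    unfold pvFA at h
    by_cases hs : PySem.Chars.startswith (cs.drop i) pat
    · rw [if_pos hs] at h; cases h; rfl
    · rw [if_neg hs] at h; cases h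
  have hkeyB : ∀ i x, pvFB cs pat i = some x → x.1 = (i:Int) := by
    intro i x h
    unfold pvFB at h
    split at h
    · cases h; rfl
    · cases h
  have hdisj : ∀ i, pvFA cs pat i ≠ none → pvFB cs pat i = none := by
    intro i h
    unfold pvFA at h
    unfold pvFB
    by_cases hs : PySem.Chars.startswith (cs.drop i) pat
    · simp [hs]
    · rw [if_neg hs] at h; exact absurd rfl h
  by_cases hcond : (pat ≠ []) ∧ ((PySem.List.pyGet? pat (-1)).getD ' ' == 's') = true
  · rw [if_pos hcond, pvQ_eq cs pat hcond, pvOcc_map_fst,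
      pvMerge_eq (pvFA cs pat) (pvFB cs pat) (List.range cs.length)
        List.pairwise_lt_range hkeyA hkeyB hdisj]
    unfold pvPairs
    apply List.filterMap_congr
    intro i _
    exact (pvHit_eq_or cs pat i).symm
  · rw [if_neg hcond]
    simp only [List.map_nil, pvMergeB_nil_right, pvOcc_map_fst]
    unfold pvPairs
    apply List.filterMap_congr
    intro i _
    unfold pvFA pvHit
    by_cases hs : PySem.Chars.startswith (cs.drop i) pat
    · simp [hs]
    · rw [if_neg hs, if_neg hs, if_neg]
      intro hcnd
      have hcnd' : (PySem.List.pyGet? pat (-1)).getD ' ' = 's' ∧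
          PySem.Chars.startswith (cs.drop i) pat.dropLast = true := by simpa using hcnd
      apply hcond
      constructor
      · intro hnil; subst hnil; exact absurd hcnd'.1 (by decide)
      · simp [hcnd'.1]

-- === the two per-entity steps both equal pvStepC ===
lemma pvStepA_eq (cs : List Char) (acc : List Int × List Int) (ent : String) :
    (acc.1 ++ pvExtendL cs (pvScanA cs ent.toList).1,
     acc.2 ++ pvExtendR cs (pvScanA cs ent.toList).2) = pvStepC cs acc ent := by
  rw [pvScanA_eq]
  have h1 : ∀ v ∈ (pvPairs cs ent.toList).map Prod.fst, (0:Int) ≤ v := by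
    intro v hv
    rcases List.mem_map.mp hv with ⟨pr, hpr, hpr2⟩
    rw [← hpr2]
    exact (pvPairs_bounds cs ent.toList pr hpr).1
  have h2 : ∀ v ∈ (pvPairs cs ent.toList).map Prod.snd, v ≤ (cs.length : Int) - 1 := by
    intro v hv
    rcases List.mem_map.mp hv with ⟨pr, hpr, hpr2⟩
    rw [← hpr2]
    exact (pvPairs_bounds cs ent.toList pr hpr).2
  rw [pvExtendL_eq cs _ h1, pvExtendR_eq cs _ h2]
  unfold pvStepC
  rw [List.map_map, List.map_map]
  rfl

lemma pvStepB_eq (cs : List Char) (acc : List Int × List Int) (ent : String) :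
    (pvMergeB ((pvOcc cs ent.toList).map (fun i => (i, i + (ent.toList.length:Int) - 1)))
      ((if (ent.toList ≠ []) ∧ ((PySem.List.pyGet? ent.toList (-1)).getD ' ' == 's') = true then
          (pvOcc cs (PySem.List.slice ent.toList none (some (-1)))).filter
            (fun i => !(PySem.Set.contains (PySem.Set.ofList (pvOcc cs ent.toList)) i))
        else []).map (fun i => (i, i + (ent.toList.length:Int) - 2)))).foldl
      (fun a2 pr => (a2.1 ++ [pvLeftB cs pr.1], a2.2 ++ [pvRightB cs pr.2])) acc
    = pvStepC cs acc ent := by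
  rw [pvPairsB_eq]
  unfold pvStepC
  rw [show acc = (acc.1, acc.2) from rfl,
    PySem.List.foldl_prod_mk (fun s e => s ++ [pvLeftB cs e.1])
      (fun s e => s ++ [pvRightB cs e.2]) (pvPairs cs ent.toList) acc.1 acc.2,
    PySem.List.foldl_append_singleton_eq_map, PySem.List.foldl_append_singleton_eq_map]

-- ===== VERDICT (by name: the statement is the Claim_ definition above) =====
theorem make_food_list_spec : Claim_equal_make_food_list := by
  unfold Claim_equal_make_food_list
  intro ents text _
  unfold Spec_make_food_list make_food_list make_food_list_alt
  by_cases h : ents = ["no"]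
  · rw [if_pos h, if_pos h]
  · rw [if_neg h, if_neg h]
    have H : ∀ (l : List String) (acc : List Int × List Int),
        l.foldl (fun acc (ent : String) =>
          (acc.1 ++ pvExtendL text.toList (pvScanA text.toList ent.toList).1,
           acc.2 ++ pvExtendR text.toList (pvScanA text.toList ent.toList).2)) acc
        = l.foldl (fun acc (ent : String) =>
          (pvMergeB ((pvOcc text.toList ent.toList).map
              (fun i => (i, i + (ent.toList.length:Int) - 1)))
            ((if (ent.toList ≠ []) ∧
                 ((PySem.List.pyGet? ent.toList (-1)).getD ' ' == 's') = true then
                (pvOcc text.toList (PySem.List.slice ent.toList none (some (-1)))).filter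
                  (fun i => !(PySem.Set.contains
                    (PySem.Set.ofList (pvOcc text.toList ent.toList)) i))
              else []).map (fun i => (i, i + (ent.toList.length:Int) - 2)))).foldl
            (fun a2 pr => (a2.1 ++ [pvLeftB text.toList pr.1],
                           a2.2 ++ [pvRightB text.toList pr.2])) acc) acc := by
      intro l
      induction l with
      | nil => intro acc; rfl
      | cons e t ih =>
        intro acc
        rw [List.foldl_cons, List.foldl_cons, ih]
        congr 1
        exact (pvStepA_eq text.toList acc e).trans (pvStepB_eq text.toList acc e).symm
    exact H ents ([], [])
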